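-- pv_equiv track=rewrite | github.com/Nikku03/enzyme_Software | src/enzyme_software/modules/module3_experiment_designer.py | _reject_status
-- ===== SOURCE A (Python) =====
-- from typing import Any, Dict, List, Optional, Tuple
--
-- def _reject_status(reasons: List[str]) -> str:
--     if any("batch_id mismatch" in reason for reason in reasons):
--         return "REJECTED_BATCH_ID_MISMATCH"
--     if any("negative control conversion" in reason for reason in reasons):
--         return "REJECTED_CONTROL_VIOLATION"
--     if any("baseline stdev" in reason for reason in reasons):
--         return "REJECTED_HIGH_VARIANCE"
--     if any("baseline n < 2" in reason for reason in reasons):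
--         return "REJECTED_LOW_REPLICATES"
--     if any("baseline below negative control margin" in reason for reason in reasons):
--         return "REJECTED_SANITY_RANKING"
--     return "REJECTED_QC_FAIL"
-- ===== SOURCE B (Python) =====
-- _PRIORITY = [
--     ("batch_id mismatch", "REJECTED_BATCH_ID_MISMATCH"),
--     ("negative control conversion", "REJECTED_CONTROL_VIOLATION"),
--     ("baseline stdev", "REJECTED_HIGH_VARIANCE"),
--     ("baseline n < 2", "REJECTED_LOW_REPLICATES"),
--     ("baseline below negative control margin", "REJECTED_SANITY_RANKING"),
-- ]
--
--
-- def _reject_status(reasons):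
--     best = None
--     for reason in reasons:
--         for i, (sub, status) in enumerate(_PRIORITY):
--             if sub in reason:
--                 if best is None or i < best[0]:
--                     best = (i, status)
--                 break
--     return best[1] if best is not None else "REJECTED_QC_FAIL"
-- ===== Notes on version B (the rewrite author's own statement) =====
-- stated objective: alternative
-- what changed: A makes five sequential full passes over reasons (one any() per status); B iterates over reasons once, finding each reason's first matching priority-table entry and keeping the minimum-index match, then returns its status.
import Mathlib
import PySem

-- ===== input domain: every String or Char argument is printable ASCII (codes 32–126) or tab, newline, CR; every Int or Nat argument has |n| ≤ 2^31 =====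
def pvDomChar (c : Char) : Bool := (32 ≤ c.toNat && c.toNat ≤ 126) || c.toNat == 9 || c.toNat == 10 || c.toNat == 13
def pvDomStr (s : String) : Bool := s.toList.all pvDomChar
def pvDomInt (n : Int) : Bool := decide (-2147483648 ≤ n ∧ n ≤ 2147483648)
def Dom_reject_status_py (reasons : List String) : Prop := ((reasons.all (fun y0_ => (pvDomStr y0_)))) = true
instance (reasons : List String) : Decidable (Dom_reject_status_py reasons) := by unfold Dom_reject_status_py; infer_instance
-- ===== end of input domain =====

-- B replaces A's five sequential any() passes by one pass over reasons keeping the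
-- minimum-index match against an ordered priority table (objective: alternative).

-- ===== PORT A =====
def reject_status_py (reasons : List String) : String :=
  if reasons.any (fun reason => PySem.Str.isIn "batch_id mismatch" reason) then
    "REJECTED_BATCH_ID_MISMATCH"
  else if reasons.any (fun reason => PySem.Str.isIn "negative control conversion" reason) then
    "REJECTED_CONTROL_VIOLATION"
  else if reasons.any (fun reason => PySem.Str.isIn "baseline stdev" reason) then
    "REJECTED_HIGH_VARIANCE"
  else if reasons.any (fun reason => PySem.Str.isIn "baseline n < 2" reason) then
    "REJECTED_LOW_REPLICATES"
  else if reasons.any (fun reason => PySem.Str.isIn "baseline below negative control margin" reason) then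
    "REJECTED_SANITY_RANKING"
  else
    "REJECTED_QC_FAIL"

-- ===== PORT B =====
def pvPriority : List (String × String) :=
  [("batch_id mismatch", "REJECTED_BATCH_ID_MISMATCH"),
   ("negative control conversion", "REJECTED_CONTROL_VIOLATION"),
   ("baseline stdev", "REJECTED_HIGH_VARIANCE"),
   ("baseline n < 2", "REJECTED_LOW_REPLICATES"),
   ("baseline below negative control margin", "REJECTED_SANITY_RANKING")]

-- inner 'for i, (sub, status) in enumerate(_PRIORITY): … break' of Source B
def pvFirstMatch (reason : String) : List (String × String) → Nat → Option (Nat × String)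
  | [], _ => none
  | (sub, status) :: rest, i =>
      if PySem.Str.isIn sub reason then some (i, status)
      else pvFirstMatch reason rest (i + 1)

-- one iteration of Source B's outer loop
def pvStep (best : Option (Nat × String)) (reason : String) : Option (Nat × String) :=
  match pvFirstMatch reason pvPriority 0 with
  | none => best
  | some p =>
      match best with
      | none => some p
      | some b => if p.1 < b.1 then some p else best

def reject_status_py_alt (reasons : List String) : String :=
  match reasons.foldl pvStep none with
  | some b => b.2
  | none => "REJECTED_QC_FAIL"

-- ===== PRECONDITION & SPEC =====
def Spec_reject_status_py (reasons : List String) (out : String) : Prop := out = reject_status_py_alt reasons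
instance (reasons : List String) (out : String) : Decidable (Spec_reject_status_py reasons out) := by unfold Spec_reject_status_py; infer_instance

-- ===== CLAIM (what is proved, stated in full; the proofs are below) =====
def Claim_equal_reject_status_py : Prop := ∀ (reasons : List String), Dom_reject_status_py reasons → Spec_reject_status_py reasons (reject_status_py reasons)

-- ===== LEMMAS AND PROOFS =====

-- stable minimum-by-first-component on Option (Nat × String); pvStep best r = pvOmin best (first match of r)
def pvOmin (a b : Option (Nat × String)) : Option (Nat × String) :=
  match b with
  | none => a
  | some p =>
    match a with
    | none => some p
    | some q => if p.1 < q.1 then some p else a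

theorem pvStep_eq_omin (best : Option (Nat × String)) (r : String) :
    pvStep best r = pvOmin best (pvFirstMatch r pvPriority 0) := rfl

theorem pvOmin_none_left (x : Option (Nat × String)) : pvOmin none x = x := by
  cases x <;> rfl

theorem pvOmin_assoc (a x y : Option (Nat × String)) :
    pvOmin (pvOmin a x) y = pvOmin a (pvOmin x y) := by
  cases a <;> cases x <;> cases y <;> simp only [pvOmin] <;>
    (try split_ifs) <;> (try simp only []) <;> (try split_ifs) <;>
    first | rfl | omega

theorem foldl_pvStep_acc (rs : List String) : ∀ acc : Option (Nat × String),
    rs.foldl pvStep acc = pvOmin acc (rs.foldl pvStep none) := by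
  induction rs with
  | nil => intro acc; rfl
  | cons r rs ih =>
      intro acc
      simp only [List.foldl_cons]
      rw [ih (pvStep acc r), ih (pvStep none r), pvStep_eq_omin, pvStep_eq_omin,
        pvOmin_none_left, pvOmin_assoc]

-- first match of a single reason against the literal table, as an if-chain
theorem pvFirstMatch_eq (r : String) :
    pvFirstMatch r pvPriority 0 =
      (if PySem.Str.isIn "batch_id mismatch" r then some (0, "REJECTED_BATCH_ID_MISMATCH")
       else if PySem.Str.isIn "negative control conversion" r then some (1, "REJECTED_CONTROL_VIOLATION")
       else if PySem.Str.isIn "baseline stdev" r then some (2, "REJECTED_HIGH_VARIANCE")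
       else if PySem.Str.isIn "baseline n < 2" r then some (3, "REJECTED_LOW_REPLICATES")
       else if PySem.Str.isIn "baseline below negative control margin" r then some (4, "REJECTED_SANITY_RANKING")
       else none) := rfl

-- abbreviation for the if-chain over 5 match bits
def pvChain (b0 b1 b2 b3 b4 : Bool) : Option (Nat × String) :=
  if b0 then some (0, "REJECTED_BATCH_ID_MISMATCH")
  else if b1 then some (1, "REJECTED_CONTROL_VIOLATION")
  else if b2 then some (2, "REJECTED_HIGH_VARIANCE")
  else if b3 then some (3, "REJECTED_LOW_REPLICATES")
  else if b4 then some (4, "REJECTED_SANITY_RANKING")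
  else none

theorem pvOmin_chain (c0 c1 c2 c3 c4 m0 m1 m2 m3 m4 : Bool) :
    pvOmin (pvChain c0 c1 c2 c3 c4) (pvChain m0 m1 m2 m3 m4)
      = pvChain (c0 || m0) (c1 || m1) (c2 || m2) (c3 || m3) (c4 || m4) := by
  cases c0 <;> cases c1 <;> cases c2 <;> cases c3 <;> cases c4 <;>
    cases m0 <;> cases m1 <;> cases m2 <;> cases m3 <;> cases m4 <;> rfl

-- minimum-index match over the whole list equals the if-chain on the five any() bits
theorem foldl_pvStep_chain (rs : List String) :
    rs.foldl pvStep none =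
      pvChain (rs.any (fun r => PySem.Str.isIn "batch_id mismatch" r))
        (rs.any (fun r => PySem.Str.isIn "negative control conversion" r))
        (rs.any (fun r => PySem.Str.isIn "baseline stdev" r))
        (rs.any (fun r => PySem.Str.isIn "baseline n < 2" r))
        (rs.any (fun r => PySem.Str.isIn "baseline below negative control margin" r)) := by
  induction rs with
  | nil => rfl
  | cons r rs ih =>
      simp only [List.foldl_cons, List.any_cons]
      rw [foldl_pvStep_acc, ih, pvStep_eq_omin, pvOmin_none_left, pvFirstMatch_eq,
        ← pvOmin_chain]
      rfl

theorem pvChain_out (b0 b1 b2 b3 b4 : Bool) :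
    (match pvChain b0 b1 b2 b3 b4 with
     | some b => b.2
     | none => "REJECTED_QC_FAIL")
      = (if b0 then "REJECTED_BATCH_ID_MISMATCH"
         else if b1 then "REJECTED_CONTROL_VIOLATION"
         else if b2 then "REJECTED_HIGH_VARIANCE"
         else if b3 then "REJECTED_LOW_REPLICATES"
         else if b4 then "REJECTED_SANITY_RANKING"
         else "REJECTED_QC_FAIL") := by
  cases b0 <;> cases b1 <;> cases b2 <;> cases b3 <;> cases b4 <;> rfl

-- ===== VERDICT (by name: the statement is the Claim_ definition above) =====
theorem reject_status_py_spec : Claim_equal_reject_status_py := by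
  intro reasons _
  show reject_status_py reasons = reject_status_py_alt reasons
  rw [reject_status_py_alt, foldl_pvStep_chain, pvChain_out]
  rfl
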